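-- pv_equiv track=rewrite | github.com/vibhorrawal/code-backup | python/naive bayes implementation for weather data (lab project)/main.py | data_prep
-- ===== SOURCE A (Python) =====
-- def data_prep(data):
--     for i in range(len(data)):
--         # Outlook
--         if data[i][0] == 'overcast':
--             data[i][0] = 1
--         elif data[i][0] == 'sunny':
--             data[i][0] = 2
--         else:
--             data[i][0] = 3 # rainy
--
--         # Temp
--         if data[i][1] == 'hot':
--             data[i][1] = 1
--         elif data[i][1] == 'cool':
--             data[i][1] = 2
--         else: # mild
--             data[i][1] = 3
--
--         # Humidity
--         if data[i][2] == 'high':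
--             data[i][2] = 1
--         else:
--             data[i][2] = 2 # normal
--
--         # Windy
--         if data[i][3] == 'FALSE':
--             data[i][3] = 2
--         else:
--             data[i][3] = 1 # true
--
--     return data
-- ===== SOURCE B (Python) =====
-- def data_prep(data):
--     # Column-major staged encoding: transpose, encode each column as a whole
--     # list via boolean arithmetic, then write the codes back row by row (in place).
--     if not data:
--         return data
--     columns = list(zip(*data))
--     out0 = [1 + (x != 'overcast') + (x not in ('overcast', 'sunny')) for x in columns[0]]
--     out1 = [1 + (x != 'hot') + (x not in ('hot', 'cool')) for x in columns[1]]
--     out2 = [1 + (x != 'high') for x in columns[2]]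
--     out3 = [1 + (x == 'FALSE') for x in columns[3]]
--     for row, o, t, h, w in zip(data, out0, out1, out2, out3):
--         row[0], row[1], row[2], row[3] = o, t, h, w
--     return data
-- ===== Notes on version B (the rewrite author's own statement) =====
-- stated objective: alternative
-- what changed: B works column-major instead of row-major: it transposes the data, computes each column's integer codes as a whole list using boolean arithmetic (1 + comparisons) instead of if/elif chains, then writes the four code lists back into the rows.
-- outside the precondition, e.g. on data_prep([['sunny', 'hot']]): A raises IndexError, B raises IndexError
import Mathlib
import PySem

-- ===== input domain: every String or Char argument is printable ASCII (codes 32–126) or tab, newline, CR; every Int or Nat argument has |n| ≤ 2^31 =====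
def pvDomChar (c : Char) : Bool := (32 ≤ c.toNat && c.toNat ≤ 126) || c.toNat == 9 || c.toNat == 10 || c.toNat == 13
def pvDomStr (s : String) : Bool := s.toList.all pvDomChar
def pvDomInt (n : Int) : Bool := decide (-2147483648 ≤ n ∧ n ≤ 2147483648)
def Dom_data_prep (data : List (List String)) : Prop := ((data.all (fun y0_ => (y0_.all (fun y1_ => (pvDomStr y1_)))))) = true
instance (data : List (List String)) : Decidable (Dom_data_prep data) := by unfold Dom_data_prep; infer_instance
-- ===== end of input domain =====

-- B re-encodes the table column-major: it transposes the data, computes each column's codes as a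
-- whole list by boolean arithmetic, and writes them back row by row (objective: alternative).
-- A mutates `data` in place in Python (B does the same); the equivalence proved is about the
-- return value only.


-- ===== PORT A =====
-- A overwrites data[i][0..3] via if/elif chains; the in-place writes become building the
-- encoded row of four ints.
def encRowA (row : List String) : List Int :=
  let o : Int := if row.getD 0 "" = "overcast" then 1 else if row.getD 0 "" = "sunny" then 2 else 3
  let t : Int := if row.getD 1 "" = "hot" then 1 else if row.getD 1 "" = "cool" then 2 else 3
  let h : Int := if row.getD 2 "" = "high" then 1 else 2
  let w : Int := if row.getD 3 "" = "FALSE" then 2 else 1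
  [o, t, h, w]

def data_prep (data : List (List String)) : List (List Int) :=
  data.map encRowA

-- ===== PORT B =====
-- 1 + (x != 'overcast') + (x not in ('overcast','sunny'))  etc.
def code0 (x : String) : Int :=
  1 + (if x ≠ "overcast" then 1 else 0) + (if x ∉ (["overcast", "sunny"] : List String) then 1 else 0)
def code1 (x : String) : Int :=
  1 + (if x ≠ "hot" then 1 else 0) + (if x ∉ (["hot", "cool"] : List String) then 1 else 0)
def code2 (x : String) : Int :=
  1 + (if x ≠ "high" then 1 else 0)
def code3 (x : String) : Int :=
  1 + (if x = "FALSE" then 1 else 0)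

-- the write-back loop `for row, o, t, h, w in zip(data, out0, out1, out2, out3)`
def zip4 : List Int → List Int → List Int → List Int → List (List Int)
  | o :: os, t :: ts, h :: hs, w :: ws => [o, t, h, w] :: zip4 os ts hs ws
  | _, _, _, _ => []

def data_prep_alt (data : List (List String)) : List (List Int) :=
  if data = [] then []
  else
    -- columns = list(zip(*data)); column j is exact under Pre_ (every row has 4 entries)
    let col := fun (j : Nat) => data.map (fun r => r.getD j "")
    let out0 := (col 0).map code0
    let out1 := (col 1).map code1
    let out2 := (col 2).map code2
    let out3 := (col 3).map code3
    zip4 out0 out1 out2 out3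

-- ===== PRECONDITION & SPEC =====
-- Pre_ requires every row to have exactly 4 entries: on shorter rows A raises IndexError, and on
-- longer rows A returns a row with leftover strings past index 3, which is not a List (List Int).
def Pre_data_prep (data : List (List String)) : Prop :=
  ∀ row ∈ data, row.length = 4
instance (data : List (List String)) : Decidable (Pre_data_prep data) := by unfold Pre_data_prep; infer_instance

def pvWitness_data_prep : List (List String) :=
  [["sunny", "hot", "high", "FALSE"], ["rainy", "mild", "normal", "TRUE"]]

def Spec_data_prep (data : List (List String)) (out : List (List Int)) : Prop := out = data_prep_alt data
instance (data : List (List String)) (out : List (List Int)) : Decidable (Spec_data_prep data out) := by unfold Spec_data_prep; infer_instance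

-- ===== CLAIM (what is proved, stated in full; the proofs are below) =====
def Claim_equal_data_prep : Prop := ∀ (data : List (List String)), Dom_data_prep data → Pre_data_prep data → Spec_data_prep data (data_prep data)

-- ===== LEMMAS AND PROOFS =====
lemma row_eq (a b c d : String) :
    encRowA [a, b, c, d] = [code0 a, code1 b, code2 c, code3 d] := by
  simp only [encRowA, code0, code1, code2, code3, List.getD, List.mem_cons,
    List.not_mem_nil, or_false]
  norm_num
  refine ⟨?_, ?_, ?_, ?_⟩
  · by_cases h1 : a = "overcast" <;> by_cases h2 : a = "sunny" <;> simp [h1, h2]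
  · by_cases h1 : b = "hot" <;> by_cases h2 : b = "cool" <;> simp [h1, h2]
  · by_cases h1 : c = "high" <;> simp [h1]
  · by_cases h1 : d = "FALSE" <;> simp [h1]

lemma zip4_cols (data : List (List String)) (hpre : ∀ row ∈ data, row.length = 4) :
    zip4 ((data.map (fun r => r.getD 0 "")).map code0)
         ((data.map (fun r => r.getD 1 "")).map code1)
         ((data.map (fun r => r.getD 2 "")).map code2)
         ((data.map (fun r => r.getD 3 "")).map code3)
      = data.map encRowA := by
  induction data with
  | nil => rfl
  | cons row rest ih =>
    have hlen : row.length = 4 := hpre row (by simp)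
    match row, hlen with
    | [a, b, c, d], _ =>
      simp only [List.map_cons, zip4, List.cons.injEq]
      exact ⟨(row_eq a b c d).symm, ih (fun r hr => hpre r (List.mem_cons_of_mem _ hr))⟩

-- ===== VERDICT (by name: the statement is the Claim_ definition above) =====
theorem data_prep_spec : Claim_equal_data_prep := by
  intro data hdom hpre
  unfold Spec_data_prep data_prep data_prep_alt
  cases data with
  | nil => rfl
  | cons row rest =>
    simp only [reduceIte, List.cons_ne_nil]
    exact (zip4_cols (row :: rest) hpre).symm
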